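-- pv_equiv track=rewrite | github.com/FlipForensics/AIFT | app/analyzer.py | _match_column_name
-- ===== SOURCE A (Python) =====
-- def _match_column_name(
--     cited_column: str, csv_columns: list[str]
-- ) -> tuple[str, str | None]:
--     """Match an AI-cited column name against actual CSV headers.
--
--     Performs a three-tier match: exact, then case-insensitive with
--     whitespace/underscore normalization (fuzzy), then reports unverifiable.
--
--     Args:
--         cited_column: Column name string cited by the AI.
--         csv_columns: Actual CSV header column names.
--
--     Returns:
--         A 2-tuple of ``(match_status, matched_header)`` where
--         *match_status* is one of ``"exact"``, ``"fuzzy"``, or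
--         ``"unverifiable"``, and *matched_header* is the actual CSV
--         header that matched (``None`` when unverifiable).
--     """
--     cited_stripped = cited_column.strip()
--
--     # Tier 1: exact match.
--     for header in csv_columns:
--         if header == cited_stripped:
--             return "exact", header
--
--     # Tier 2: fuzzy match — case-insensitive, collapse whitespace/underscores.
--     def _normalize_col(name: str) -> str:
--         """Normalize a column name for fuzzy comparison."""
--         return name.strip().lower().replace("_", "").replace(" ", "")
--
--     cited_norm = _normalize_col(cited_stripped)
--     for header in csv_columns:
--         if _normalize_col(header) == cited_norm:
--             return "fuzzy", header
--
--     # Tier 3: no match found.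
--     return "unverifiable", None
-- ===== SOURCE B (Python) =====
-- def _match_column_name(
--     cited_column: str, csv_columns: list[str]
-- ) -> tuple[str, str | None]:
--     """Single-pass matcher: exact wins immediately; first fuzzy candidate kept."""
--     def _normalize_col(name: str) -> str:
--         return name.strip().lower().replace("_", "").replace(" ", "")
--
--     cited_stripped = cited_column.strip()
--     cited_norm = _normalize_col(cited_stripped)
--     fuzzy: str | None = None
--     for header in csv_columns:
--         if header == cited_stripped:
--             return "exact", header
--         if fuzzy is None and _normalize_col(header) == cited_norm:
--             fuzzy = header
--     if fuzzy is not None: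
--         return "fuzzy", fuzzy
--     return "unverifiable", None
-- ===== Notes on version B (the rewrite author's own statement) =====
-- stated objective: alternative
-- what changed: Replaced A's two sequential scans (exact pass, then fuzzy pass re-normalizing every header) with one single pass that returns exact immediately and records only the first fuzzy candidate, normalizing the cited name once.
import Mathlib
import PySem

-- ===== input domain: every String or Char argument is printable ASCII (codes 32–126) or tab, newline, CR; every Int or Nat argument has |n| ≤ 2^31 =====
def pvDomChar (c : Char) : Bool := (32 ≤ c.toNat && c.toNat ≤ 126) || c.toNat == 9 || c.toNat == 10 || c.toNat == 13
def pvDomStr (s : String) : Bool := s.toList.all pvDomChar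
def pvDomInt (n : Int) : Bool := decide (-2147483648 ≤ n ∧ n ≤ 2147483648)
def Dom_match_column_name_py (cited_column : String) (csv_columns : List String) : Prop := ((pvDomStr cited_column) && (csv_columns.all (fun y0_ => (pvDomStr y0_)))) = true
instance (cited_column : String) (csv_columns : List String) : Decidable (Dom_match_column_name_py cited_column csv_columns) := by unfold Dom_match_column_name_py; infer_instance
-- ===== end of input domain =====

-- B replaces A's two sequential scans by one single pass recording the first fuzzy candidate (objective: alternative decomposition, same cost).

-- ===== PORT A =====
-- _normalize_col: name.strip().lower().replace("_", "").replace(" ", "")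
def pvNormalizeCol (name : String) : String :=
  PySem.Str.replace (PySem.Str.replace (PySem.Str.lower (PySem.Str.strip name)) "_" "") " " ""

-- Tier 1 loop: first header equal to cited_stripped
def pvExactScan (cs : String) : List String → Option String
  | [] => none
  | h :: t => if h = cs then some h else pvExactScan cs t

-- Tier 2 loop: first header whose normal form equals cited_norm
def pvFuzzyScan (cn : String) : List String → Option String
  | [] => none
  | h :: t => if pvNormalizeCol h = cn then some h else pvFuzzyScan cn t

def match_column_name_py (cited_column : String) (csv_columns : List String) : String × Option String :=
  let cited_stripped := PySem.Str.strip cited_column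
  match pvExactScan cited_stripped csv_columns with
  | some h => ("exact", some h)
  | none =>
    let cited_norm := pvNormalizeCol cited_stripped
    match pvFuzzyScan cited_norm csv_columns with
    | some h => ("fuzzy", some h)
    | none => ("unverifiable", none)

-- ===== PORT B =====
-- single pass; `fuzzy` is the first recorded fuzzy candidate
def pvOnePass (cs cn : String) (fuzzy : Option String) : List String → String × Option String
  | [] =>
    match fuzzy with
    | some h => ("fuzzy", some h)
    | none => ("unverifiable", none)
  | h :: t =>
    if h = cs then ("exact", some h)
    else if fuzzy = none ∧ pvNormalizeCol h = cn then pvOnePass cs cn (some h) t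
    else pvOnePass cs cn fuzzy t

def match_column_name_py_alt (cited_column : String) (csv_columns : List String) : String × Option String :=
  let cited_stripped := PySem.Str.strip cited_column
  let cited_norm := pvNormalizeCol cited_stripped
  pvOnePass cited_stripped cited_norm none csv_columns

-- ===== PRECONDITION & SPEC =====
def Spec_match_column_name_py (cited_column : String) (csv_columns : List String) (out : String × Option String) : Prop := out = match_column_name_py_alt cited_column csv_columns
instance (cited_column : String) (csv_columns : List String) (out : String × Option String) : Decidable (Spec_match_column_name_py cited_column csv_columns out) := by unfold Spec_match_column_name_py; infer_instance

-- ===== CLAIM (what is proved, stated in full; the proofs are below) =====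
def Claim_equal_match_column_name_py : Prop := ∀ (cited_column : String) (csv_columns : List String), Dom_match_column_name_py cited_column csv_columns → Spec_match_column_name_py cited_column csv_columns (match_column_name_py cited_column csv_columns)

-- ===== LEMMAS AND PROOFS =====
-- Loop invariant: the one-pass fold with accumulator `acc` computes A's two-scan result
-- with `acc` standing for a fuzzy candidate already found to the left (no exact there).
theorem pvOnePass_eq (cs cn : String) (l : List String) (acc : Option String) :
    pvOnePass cs cn acc l =
      match pvExactScan cs l with
      | some h => ("exact", some h)
      | none =>
        match acc.orElse (fun _ => pvFuzzyScan cn l) with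
        | some h => ("fuzzy", some h)
        | none => ("unverifiable", none) := by
  induction l generalizing acc with
  | nil => cases acc <;> simp [pvOnePass, pvExactScan, pvFuzzyScan, Option.orElse]
  | cons h t ih =>
    by_cases he : h = cs
    · simp [pvOnePass, pvExactScan, he]
    · by_cases hf : pvNormalizeCol h = cn
      · cases acc with
        | none => simp [pvOnePass, pvExactScan, pvFuzzyScan, he, hf, ih, Option.orElse]
        | some a => simp [pvOnePass, pvExactScan, pvFuzzyScan, he, hf, ih, Option.orElse]
      · cases acc with
        | none => simp [pvOnePass, pvExactScan, pvFuzzyScan, he, hf, ih, Option.orElse]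
        | some a => simp [pvOnePass, pvExactScan, pvFuzzyScan, he, hf, ih, Option.orElse]

-- ===== VERDICT (by name: the statement is the Claim_ definition above) =====
theorem match_column_name_py_spec : Claim_equal_match_column_name_py := by
  intro cited_column csv_columns _
  unfold Spec_match_column_name_py match_column_name_py match_column_name_py_alt
  rw [pvOnePass_eq]
  simp [Option.orElse]
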